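-- pv_equiv track=rewrite | github.com/MrWrynn/TutorialPython | Quiz1_CristopherMoreira.py | combina_aux
-- ===== SOURCE A (Python) =====
-- def combina_aux(num, resultado, exp):
--     digito=num%10
--     if num == 0:
--         return resultado
--     elif digito%4 == 0:
--         return combina_aux(num // 10, resultado + 0*(10**exp), exp+1)
--     else:
--         return combina_aux(num // 10, resultado + digito*(10**exp), exp + 1)
-- ===== SOURCE B (Python) =====
-- def combina_aux(num, resultado, exp):
--     weight = 10 ** exp
--     while num:
--         num, d = divmod(num, 10)
--         if d % 4:
--             resultado += d * weight
--         weight *= 10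
--     return resultado
-- ===== Notes on version B (the rewrite author's own statement) =====
-- stated objective: faster
-- what changed: Replaces the three-branch tail recursion that recomputes 10**exp from scratch at every digit with an iterative while loop that maintains the positional weight and multiplies it by 10 per digit, removing the repeated big-int exponentiation.
-- outside the precondition, e.g. on combina_aux(84, 0, -1): A returns 0.0, B returns 0; on combina_aux(-3, 0, 0): A raises RecursionError, B does not finish within the time limit
import Mathlib
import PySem

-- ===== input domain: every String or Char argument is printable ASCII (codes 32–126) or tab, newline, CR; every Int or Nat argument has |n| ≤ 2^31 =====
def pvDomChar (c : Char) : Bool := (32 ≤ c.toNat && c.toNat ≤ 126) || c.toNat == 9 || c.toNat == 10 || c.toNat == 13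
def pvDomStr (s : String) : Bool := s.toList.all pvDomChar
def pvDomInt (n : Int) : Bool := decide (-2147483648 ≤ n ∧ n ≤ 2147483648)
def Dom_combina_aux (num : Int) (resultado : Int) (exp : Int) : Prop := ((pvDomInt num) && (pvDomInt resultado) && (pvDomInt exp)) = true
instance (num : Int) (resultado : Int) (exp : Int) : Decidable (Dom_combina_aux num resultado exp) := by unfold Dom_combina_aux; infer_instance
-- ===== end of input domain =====

-- B replaces A's three-branch tail recursion (recomputing 10**exp each digit) with an
-- iterative loop that maintains the positional weight directly; equal on Pre_ (num ≥ 0, exp ≥ 0 unless num = 0).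


-- ===== PORT A =====
-- fuel-bounded transcription of A's recursion (fuel num.natAbs + 1 suffices for num ≥ 0,
-- the only inputs in Pre_; Python recurses forever for num < 0).
-- 10 ** exp is ported as 10 ^ exp.toNat, exact for exp ≥ 0 (Pre_; Python yields a float for exp < 0).
def combinaAuxRec : Nat → Int → Int → Int → Int
  | 0, _, resultado, _ => resultado
  | fuel + 1, num, resultado, exp =>
    let digito := PySem.Int.mod num 10
    if num = 0 then resultado
    else if PySem.Int.mod digito 4 = 0 then
      combinaAuxRec fuel (PySem.Int.floordiv num 10) (resultado + 0 * (10 ^ exp.toNat)) (exp + 1)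
    else
      combinaAuxRec fuel (PySem.Int.floordiv num 10) (resultado + digito * (10 ^ exp.toNat)) (exp + 1)

def combina_aux (num : Int) (resultado : Int) (exp : Int) : Int :=
  combinaAuxRec (num.natAbs + 1) num resultado exp

-- ===== PORT B =====
-- fuel-bounded transcription of B's while loop over the state (num, resultado, weight);
-- weight = 10 ** exp is ported as 10 ^ exp.toNat, exact for exp ≥ 0 (Pre_).
def combinaAuxLoop : Nat → Int → Int → Int → Int
  | 0, _, resultado, _ => resultado
  | fuel + 1, num, resultado, weight =>
    if num ≠ 0 then
      let d := PySem.Int.mod num 10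
      let num' := PySem.Int.floordiv num 10
      combinaAuxLoop fuel num' (if PySem.Int.mod d 4 ≠ 0 then resultado + d * weight else resultado) (weight * 10)
    else resultado

def combina_aux_alt (num : Int) (resultado : Int) (exp : Int) : Int :=
  combinaAuxLoop (num.natAbs + 1) num resultado (10 ^ exp.toNat)

-- ===== PRECONDITION & SPEC =====
-- Pre_ excludes num < 0 (A recurses forever, RecursionError) and exp < 0 with num ≠ 0
-- (A returns a float there, not an int).
def Pre_combina_aux (num : Int) (resultado : Int) (exp : Int) : Prop :=
  0 ≤ num ∧ (0 ≤ exp ∨ num = 0)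
instance (num : Int) (resultado : Int) (exp : Int) : Decidable (Pre_combina_aux num resultado exp) := by unfold Pre_combina_aux; infer_instance
def pvWitness_combina_aux : Int × Int × Int := (1234, 0, 0)

def Spec_combina_aux (num : Int) (resultado : Int) (exp : Int) (out : Int) : Prop := out = combina_aux_alt num resultado exp
instance (num : Int) (resultado : Int) (exp : Int) (out : Int) : Decidable (Spec_combina_aux num resultado exp out) := by unfold Spec_combina_aux; infer_instance

-- ===== CLAIM (what is proved, stated in full; the proofs are below) =====
def Claim_equal_combina_aux : Prop := ∀ (num : Int) (resultado : Int) (exp : Int), Dom_combina_aux num resultado exp → Pre_combina_aux num resultado exp → Spec_combina_aux num resultado exp (combina_aux num resultado exp)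

-- ===== LEMMAS AND PROOFS =====

-- For 0 ≤ num and 0 ≤ exp, each A-step matches each B-step with weight = 10 ^ exp.toNat.
theorem combinaAux_rec_eq_loop (fuel : Nat) : ∀ (num resultado exp : Int), 0 ≤ num → 0 ≤ exp →
    combinaAuxRec fuel num resultado exp = combinaAuxLoop fuel num resultado (10 ^ exp.toNat) := by
  induction fuel with
  | zero => intro num resultado exp _ _; rfl
  | succ f ih =>
    intro num resultado exp hnum hexp
    by_cases h0 : num = 0
    · simp [combinaAuxRec, combinaAuxLoop, h0]
    · have hdiv : 0 ≤ PySem.Int.floordiv num 10 := by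
        rw [PySem.Int.floordiv_eq_ediv_of_pos (by norm_num)]
        exact Int.ediv_nonneg hnum (by norm_num)
      have hpow : (10 : Int) ^ (exp + 1).toNat = 10 ^ exp.toNat * 10 := by
        rw [show (exp + 1).toNat = exp.toNat + 1 by omega, pow_succ]
      by_cases h4 : PySem.Int.mod (PySem.Int.mod num 10) 4 = 0
      · simp only [combinaAuxRec, combinaAuxLoop, h0, h4, ite_true, ite_false,
          ne_eq, not_true_eq_false, not_false_eq_true]
        rw [ih _ _ _ hdiv (by omega), hpow]
        norm_num
      · simp only [combinaAuxRec, combinaAuxLoop, h0, h4, ne_eq, not_false_eq_true,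
          ite_true, ite_false]
        rw [ih _ _ _ hdiv (by omega), hpow]

-- ===== VERDICT (by name: the statement is the Claim_ definition above) =====
theorem combina_aux_spec : Claim_equal_combina_aux := by
  intro num resultado exp _ hpre
  unfold Spec_combina_aux combina_aux combina_aux_alt
  rcases hpre with ⟨hnum, hexp | h0⟩
  · exact combinaAux_rec_eq_loop _ num resultado exp hnum hexp
  · subst h0; rfl
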